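-- pv_equiv track=rewrite | github.com/Javert15/bachelor_thesis | requester_functions.py | split_publications
-- ===== SOURCE A (Python) =====
-- def split_publications(publications):
--     splitA = []
--     splitB = []
--     splitC = []
--
--
--     for i in range(len(publications)):
--         if i%20 ==0:
--             splitA.append(publications[i])
--         elif i%20 ==1:
--             splitB.append(publications[i])
--         else:
--             splitC.append(publications[i])
--     return [splitA, splitB, splitC]
-- ===== SOURCE B (Python) =====
-- def split_publications(publications):
--     splitA = []
--     splitB = []
--     splitC = []
--     n = len(publications)
--     start = 0
--     while start < n:
--         splitA += publications[start:start + 1]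
--         splitB += publications[start + 1:start + 2]
--         splitC += publications[start + 2:start + 20]
--         start += 20
--     return [splitA, splitB, splitC]
-- ===== Notes on version B (the rewrite author's own statement) =====
-- stated objective: alternative
-- what changed: Replaces the per-element index loop with a three-way mod-20 branch by a while loop that walks the list in 20-element blocks and extracts each bucket's share of a block with constant-stride slices (chunk[:1], chunk[1:2], chunk[2:20]), so the per-element branch and indexing disappear.
import Mathlib
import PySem

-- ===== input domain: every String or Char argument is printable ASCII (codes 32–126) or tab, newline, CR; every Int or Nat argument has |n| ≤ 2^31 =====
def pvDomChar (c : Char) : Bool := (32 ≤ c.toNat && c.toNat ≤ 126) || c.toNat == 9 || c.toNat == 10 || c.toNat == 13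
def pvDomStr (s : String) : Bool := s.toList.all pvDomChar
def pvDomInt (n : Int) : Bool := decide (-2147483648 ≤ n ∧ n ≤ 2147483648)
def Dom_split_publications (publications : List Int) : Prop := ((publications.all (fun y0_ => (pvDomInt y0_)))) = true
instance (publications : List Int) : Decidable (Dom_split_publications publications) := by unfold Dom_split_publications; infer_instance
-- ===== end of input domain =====

-- B walks the list in 20-element blocks with a while loop and slices each bucket's share
-- of a block, instead of A's per-element index loop with a three-way mod-20 branch.


-- ===== PORT A =====
def split_publications (publications : List Int) : List (List Int) :=
  let r := (PySem.List.pyRange 0 (PySem.List.len publications) 1).foldl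
    (fun (acc : List Int × List Int × List Int) i =>
      if PySem.Int.mod i 20 = 0 then
        (acc.1 ++ [PySem.List.pyGetD publications i 0], acc.2.1, acc.2.2)
      else if PySem.Int.mod i 20 = 1 then
        (acc.1, acc.2.1 ++ [PySem.List.pyGetD publications i 0], acc.2.2)
      else
        (acc.1, acc.2.1, acc.2.2 ++ [PySem.List.pyGetD publications i 0]))
    ([], [], [])
  [r.1, r.2.1, r.2.2]

-- ===== PORT B =====
-- the while loop of Source B: state (start, splitA, splitB, splitC), advancing by 20
def altLoop (pubs : List Int) (n : Int) (start : Int)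
    (sa sb sc : List Int) : List Int × List Int × List Int :=
  if start < n then
    altLoop pubs n (start + 20)
      (sa ++ PySem.List.slice pubs (some start) (some (start + 1)))
      (sb ++ PySem.List.slice pubs (some (start + 1)) (some (start + 2)))
      (sc ++ PySem.List.slice pubs (some (start + 2)) (some (start + 20)))
  else (sa, sb, sc)
termination_by (n - start).toNat
decreasing_by omega

def split_publications_alt (publications : List Int) : List (List Int) :=
  let r := altLoop publications (PySem.List.len publications) 0 [] [] []
  [r.1, r.2.1, r.2.2]

-- ===== PRECONDITION & SPEC =====
def Spec_split_publications (publications : List Int) (out : List (List Int)) : Prop := out = split_publications_alt publications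
instance (publications : List Int) (out : List (List Int)) : Decidable (Spec_split_publications publications out) := by unfold Spec_split_publications; infer_instance

-- ===== CLAIM (what is proved, stated in full; the proofs are below) =====
def Claim_equal_split_publications : Prop := ∀ (publications : List Int), Dom_split_publications publications → Spec_split_publications publications (split_publications publications)

-- ===== LEMMAS AND PROOFS =====

-- the common 20-block characterisation of the three buckets
def spec3 : List Int → List Int × List Int × List Int
  | [] => ([], [], [])
  | y :: t =>
    let r := spec3 (t.drop 19)
    (y :: r.1, t.take 1 ++ r.2.1, (t.drop 1).take 18 ++ r.2.2)
termination_by l => l.length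
decreasing_by simp

theorem spec3_nil : spec3 [] = ([], [], []) := by simp [spec3]

theorem spec3_cons (y : Int) (t : List Int) :
    spec3 (y :: t) =
      (y :: (spec3 (t.drop 19)).1, t.take 1 ++ (spec3 (t.drop 19)).2.1,
       (t.drop 1).take 18 ++ (spec3 (t.drop 19)).2.2) := by
  rw [spec3]

-- step function of A's loop, with the index paired in
def gA (acc : List Int × List Int × List Int) (p : Int × Int) :
    List Int × List Int × List Int :=
  if PySem.Int.mod p.1 20 = 0 then (acc.1 ++ [p.2], acc.2.1, acc.2.2)
  else if PySem.Int.mod p.1 20 = 1 then (acc.1, acc.2.1 ++ [p.2], acc.2.2)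
  else (acc.1, acc.2.1, acc.2.2 ++ [p.2])

theorem gA_mod (acc : List Int × List Int × List Int) (p : Int × Int) :
    gA acc p =
      if p.1 % 20 = 0 then (acc.1 ++ [p.2], acc.2.1, acc.2.2)
      else if p.1 % 20 = 1 then (acc.1, acc.2.1 ++ [p.2], acc.2.2)
      else (acc.1, acc.2.1, acc.2.2 ++ [p.2]) := by
  simp [gA]

-- indices all ≡ ≥2 (mod 20): everything goes to bucket C
theorem foldl_gA_allC (t : List Int) (s : Int)
    (acc : List Int × List Int × List Int)
    (h : ∀ p ∈ PySem.List.enumerate t s, ¬ p.1 % 20 = 0 ∧ ¬ p.1 % 20 = 1) :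
    (PySem.List.enumerate t s).foldl gA acc = (acc.1, acc.2.1, acc.2.2 ++ t) := by
  induction t generalizing s acc with
  | nil => simp [PySem.List.enumerate_nil]
  | cons y t ih =>
    rw [PySem.List.enumerate_cons]
    have hy := h (s, y) (by rw [PySem.List.enumerate_cons]; exact List.mem_cons_self)
    simp only [List.foldl_cons, gA_mod]
    rw [if_neg hy.1, if_neg hy.2]
    rw [ih (s + 1) _ (fun p hp => h p (by rw [PySem.List.enumerate_cons]; exact List.mem_cons_of_mem _ hp))]
    simp

-- one block of length ≤ 20 starting at a multiple of 20
theorem foldl_gA_block (ys : List Int) (s : Int)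
    (hs0 : 0 ≤ s) (hs : s % 20 = 0) (hlen : ys.length ≤ 20)
    (acc : List Int × List Int × List Int) :
    (PySem.List.enumerate ys s).foldl gA acc =
      (acc.1 ++ ys.take 1, acc.2.1 ++ (ys.drop 1).take 1, acc.2.2 ++ ys.drop 2) := by
  match ys with
  | [] => simp [PySem.List.enumerate_nil]
  | [y] =>
    simp only [PySem.List.enumerate_cons, PySem.List.enumerate_nil, List.foldl_cons,
      List.foldl_nil, gA_mod]
    rw [if_pos hs]
    simp
  | y :: y' :: t =>
    simp only [PySem.List.enumerate_cons, List.foldl_cons, gA_mod]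
    rw [if_pos hs]
    have h1 : (s + 1) % 20 = 1 := by omega
    rw [if_neg (by omega), if_pos h1]
    rw [foldl_gA_allC t (s + 1 + 1) _ ?_]
    · simp
    · intro p hp
      rw [PySem.List.mem_enumerate_iff] at hp
      obtain ⟨k, hk, rfl⟩ := hp
      have hkle : k ≤ 17 := by simp at hlen; omega
      constructor <;> omega

-- A's fold over the full enumerate equals spec3, block by block
theorem foldl_gA_spec3 :
    ∀ (n : Nat) (ys : List Int) (s : Int), ys.length ≤ n → 0 ≤ s → s % 20 = 0 →
    ∀ (acc : List Int × List Int × List Int),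
    (PySem.List.enumerate ys s).foldl gA acc =
      (acc.1 ++ (spec3 ys).1, acc.2.1 ++ (spec3 ys).2.1, acc.2.2 ++ (spec3 ys).2.2) := by
  intro n
  induction n with
  | zero =>
    intro ys s hn _ _ acc
    have : ys = [] := List.eq_nil_of_length_eq_zero (by omega)
    subst this; simp [PySem.List.enumerate_nil, spec3_nil]
  | succ n ih =>
    intro ys s hn hs0 hs acc
    by_cases hle : ys.length ≤ 20
    · rw [foldl_gA_block ys s hs0 hs hle acc]
      cases ys with
      | nil => simp [spec3_nil]
      | cons y t =>
        have hlc : (y :: t).length = t.length + 1 := List.length_cons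
        have ht : t.drop 19 = [] := List.drop_eq_nil_iff.mpr (by omega)
        simp [spec3_cons, ht, spec3_nil]
        omega
    · -- split off the first 20 elements
      have hsplit : ys = ys.take 20 ++ ys.drop 20 := (List.take_append_drop 20 ys).symm
      conv_lhs => rw [hsplit]
      rw [PySem.List.enumerate_append, List.foldl_append]
      rw [foldl_gA_block (ys.take 20) s hs0 hs (by simp) acc]
      have hlen20 : (ys.take 20).length = 20 := by simp; omega
      rw [hlen20]
      push_cast
      rw [ih (ys.drop 20) (s + 20) (by simp; omega) (by omega) (by omega)]
      match ys, hle with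
      | y :: t, _ =>
        simp only [spec3_cons]
        have h20 : (y :: t).drop 20 = t.drop 19 := by simp [List.drop_succ_cons]
        rw [h20]
        have htk : (y :: t).take 20 = y :: t.take 19 := by simp [List.take_succ_cons]
        rw [htk]
        simp [List.take_succ_cons, List.drop_succ_cons, List.take_take, List.drop_take]

-- B's loop equals spec3 of the remaining suffix
theorem altLoop_spec3 (xs : List Int) :
    ∀ (n : Nat) (s : Nat), xs.length - s ≤ n → ∀ (sa sb sc : List Int),
    altLoop xs (xs.length : Int) (s : Int) sa sb sc =
      (sa ++ (spec3 (xs.drop s)).1, sb ++ (spec3 (xs.drop s)).2.1, sc ++ (spec3 (xs.drop s)).2.2) := by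
  intro n
  induction n with
  | zero =>
    intro s hn sa sb sc
    have hge : xs.length ≤ s := by omega
    rw [altLoop]
    rw [if_neg (by exact_mod_cast not_lt.mpr (by exact_mod_cast hge))]
    have : xs.drop s = [] := by simp [List.drop_eq_nil_iff]; omega
    simp [this, spec3_nil]
  | succ n ih =>
    intro s hn sa sb sc
    by_cases hlt : s < xs.length
    · rw [altLoop]
      rw [if_pos (by exact_mod_cast hlt)]
      have e1 : PySem.List.slice xs (some (s : Int)) (some ((s : Int) + 1)) = (xs.drop s).take 1 := by
        have := PySem.List.slice_natCast_add xs s 1; exact_mod_cast this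
      have e2 : PySem.List.slice xs (some ((s : Int) + 1)) (some ((s : Int) + 2)) = (xs.drop (s + 1)).take 1 := by
        have h := PySem.List.slice_natCast_add xs (s + 1) 1
        push_cast at h
        rw [show (s : Int) + 2 = (s : Int) + 1 + 1 by ring]
        exact h
      have e3 : PySem.List.slice xs (some ((s : Int) + 2)) (some ((s : Int) + 20)) = (xs.drop (s + 2)).take 18 := by
        have h := PySem.List.slice_natCast_add xs (s + 2) 18
        push_cast at h
        rw [show (s : Int) + 20 = (s : Int) + 2 + 18 by ring]
        exact h
      rw [e1, e2, e3]
      have hstep : (s : Int) + 20 = ((s + 20 : Nat) : Int) := by push_cast; ring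
      rw [hstep, ih (s + 20) (by omega)]
      -- now unfold spec3 on the nonempty drop
      obtain ⟨y, t, hyt⟩ : ∃ y t, xs.drop s = y :: t := by
        cases h : xs.drop s with
        | nil => exfalso; have := List.drop_eq_nil_iff.mp h; omega
        | cons y t => exact ⟨y, t, rfl⟩
      have hd1 : xs.drop (s + 1) = t := by
        have h := congrArg (List.drop 1) hyt
        rw [List.drop_drop] at h
        simpa [Nat.add_comm] using h
      have hd2 : xs.drop (s + 2) = t.drop 1 := by
        have h := congrArg (List.drop 2) hyt
        rw [List.drop_drop] at h
        simpa [Nat.add_comm, List.drop_succ_cons] using h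
      have hd20 : xs.drop (s + 20) = t.drop 19 := by
        have h := congrArg (List.drop 20) hyt
        rw [List.drop_drop] at h
        simpa [Nat.add_comm, List.drop_succ_cons] using h
      rw [hyt, hd1, hd2, hd20]
      simp [spec3_cons]
    · rw [altLoop]
      rw [if_neg (by exact_mod_cast not_lt.mpr (by exact_mod_cast not_lt.mp hlt))]
      have : xs.drop s = [] := by simp [List.drop_eq_nil_iff]; omega
      simp [this, spec3_nil]

-- ===== VERDICT (by name: the statement is the Claim_ definition above) =====
theorem split_publications_spec : Claim_equal_split_publications := by
  unfold Claim_equal_split_publications Spec_split_publications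
  intro pubs _
  unfold split_publications split_publications_alt
  have hA : (PySem.List.pyRange 0 (PySem.List.len pubs) 1).foldl
      (fun (acc : List Int × List Int × List Int) i =>
        if PySem.Int.mod i 20 = 0 then
          (acc.1 ++ [PySem.List.pyGetD pubs i 0], acc.2.1, acc.2.2)
        else if PySem.Int.mod i 20 = 1 then
          (acc.1, acc.2.1 ++ [PySem.List.pyGetD pubs i 0], acc.2.2)
        else
          (acc.1, acc.2.1, acc.2.2 ++ [PySem.List.pyGetD pubs i 0]))
      ([], [], []) = (PySem.List.enumerate pubs 0).foldl gA ([], [], []) := by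
    rw [PySem.List.enumerate_eq_map_pyRange (d := 0), List.foldl_map]
    rfl
  rw [hA, foldl_gA_spec3 pubs.length pubs 0 le_rfl le_rfl (by norm_num)]
  rw [show PySem.List.len pubs = (pubs.length : Int) from PySem.List.len_eq pubs]
  have hB := altLoop_spec3 pubs pubs.length 0 (by omega) [] [] []
  simp only [Nat.cast_zero, List.drop_zero] at hB
  rw [hB]
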